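-- pv_equiv track=rewrite | github.com/wssun/LLM4ModuleSum | slicebycommunity.py | extract_code_from_partition
-- ===== SOURCE A (Python) =====
-- def extract_code_from_partition(details, partition):
--     communities = {}
--     ent2string = details.get('ent2string', {})
--
--     for node, community in partition.items():
--         if community not in communities:
--             communities[community] = []
--         communities[community].append(node)
--
--     community_codes = {}
--     for community, nodes in communities.items():
--         code_snippets = [ent2string[node] for node in nodes if node in ent2string]
--         community_codes[community] = organize_code_snippets(code_snippets)
--
--     return community_codes
--
-- def organize_code_snippets(code_snippets):
--     variables = []
--     functions = []
--     for snippet in code_snippets: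
--         lines = snippet.strip().split("\n")
--         if any("{" in line for line in lines):
--             functions.append(snippet)
--         else:
--             variables.append(snippet)
--     return "\n".join(variables + [""] + functions)
-- ===== SOURCE B (Python) =====
-- def extract_code_from_partition(details, partition):
--     ent2string = details.get('ent2string', {})
--     buckets = {}  # community -> (variables, functions), in first-appearance order
--     for node, community in partition.items():
--         variables, functions = buckets.setdefault(community, ([], []))
--         snippet = ent2string.get(node)
--         if snippet is not None:
--             (functions if '{' in snippet else variables).append(snippet)
--     return {c: "\n".join(variables + [""] + functions)
--             for c, (variables, functions) in buckets.items()}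
-- ===== Notes on version B (the rewrite author's own statement) =====
-- stated objective: simpler
-- what changed: B drops A's two-pass decomposition (group nodes per community, then re-scan each group with the organize_code_snippets helper): it makes a single pass over partition.items() that looks each node up once and classifies its snippet on the spot ('{' in snippet, equivalent to A's any-line test since strip/split cannot remove a brace) into a per-community (variables, functions) pair, then joins each pair.
import Mathlib
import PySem

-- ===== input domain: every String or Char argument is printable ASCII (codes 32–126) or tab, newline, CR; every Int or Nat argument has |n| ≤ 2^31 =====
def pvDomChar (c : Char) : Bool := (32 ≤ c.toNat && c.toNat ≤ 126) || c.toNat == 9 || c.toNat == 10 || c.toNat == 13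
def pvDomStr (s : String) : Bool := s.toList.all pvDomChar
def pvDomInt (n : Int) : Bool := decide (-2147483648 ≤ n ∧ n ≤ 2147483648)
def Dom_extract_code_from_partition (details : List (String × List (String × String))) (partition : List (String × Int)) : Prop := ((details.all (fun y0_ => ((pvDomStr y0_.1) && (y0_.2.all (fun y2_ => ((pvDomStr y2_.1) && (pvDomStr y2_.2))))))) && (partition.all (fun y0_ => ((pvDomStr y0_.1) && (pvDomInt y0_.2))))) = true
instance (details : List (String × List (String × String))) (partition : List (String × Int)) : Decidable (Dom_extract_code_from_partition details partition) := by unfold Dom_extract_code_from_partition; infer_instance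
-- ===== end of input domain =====

-- B replaces A's two dict-building passes plus the organize_code_snippets helper by one fused pass
-- that classifies each snippet on the spot ('{' in snippet) into per-community (variables, functions)
-- buckets; objective: simpler (same result, one pass, no helper).

-- ===== PORT A =====
-- A-side helper: literal transliteration of organize_code_snippets.
-- snippet.strip().split("\n") with the nonempty literal separator is (split? · "\n").getD []
-- (split? is none exactly for sep = "", which cannot happen here).
def organize_code_snippets (code_snippets : List String) : String :=
  let vf : List String × List String := code_snippets.foldl
    (fun vf snippet =>
      let lines := (PySem.Str.split? (PySem.Str.strip snippet) "\n").getD []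
      if lines.any (fun line => PySem.Str.isIn "{" line) then (vf.1, vf.2 ++ [snippet])
      else (vf.1 ++ [snippet], vf.2)) ([], [])
  PySem.Str.join "\n" (vf.1 ++ [""] ++ vf.2)

-- the guarded comprehension [ent2string[node] for node in nodes if node in ent2string]
-- is nodes.filterMap get? (lookup succeeds exactly when the key is contained).
def extract_code_from_partition (details : List (String × List (String × String))) (partition : List (String × Int)) : List (Int × String) :=
  let ent2string : PySem.Dict String String :=
    PySem.Dict.ofList ((PySem.Dict.ofList details).getD "ent2string" [])
  let communities : PySem.Dict Int (List String) :=
    (PySem.Dict.ofList partition).items.foldl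
      (fun communities p =>
        let communities := if communities.contains p.2 then communities
                           else communities.insert p.2 []
        communities.modify p.2 [] (fun ns => ns ++ [p.1]))
      PySem.Dict.empty
  let community_codes : PySem.Dict Int String :=
    communities.items.foldl
      (fun community_codes p =>
        community_codes.insert p.1 (organize_code_snippets
          (p.2.filterMap (fun node => ent2string.get? node))))
      PySem.Dict.empty
  community_codes.items

-- ===== PORT B =====
def extract_code_from_partition_alt (details : List (String × List (String × String))) (partition : List (String × Int)) : List (Int × String) :=
  let ent2string : PySem.Dict String String :=
    PySem.Dict.ofList ((PySem.Dict.ofList details).getD "ent2string" [])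
  let buckets : PySem.Dict Int (List String × List String) :=
    (PySem.Dict.ofList partition).items.foldl
      (fun buckets p =>
        let buckets := buckets.setdefault p.2 ([], [])
        match ent2string.get? p.1 with
        | none => buckets
        | some snippet =>
          buckets.modify p.2 ([], []) (fun vf =>
            if PySem.Str.isIn "{" snippet then (vf.1, vf.2 ++ [snippet])
            else (vf.1 ++ [snippet], vf.2)))
      PySem.Dict.empty
  buckets.items.map (fun p => (p.1, PySem.Str.join "\n" (p.2.1 ++ [""] ++ p.2.2)))

-- ===== PRECONDITION & SPEC =====
-- (A is total: no Pre_)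
def Spec_extract_code_from_partition (details : List (String × List (String × String))) (partition : List (String × Int)) (out : List (Int × String)) : Prop := out = extract_code_from_partition_alt details partition
instance (details : List (String × List (String × String))) (partition : List (String × Int)) (out : List (Int × String)) : Decidable (Spec_extract_code_from_partition details partition out) := by unfold Spec_extract_code_from_partition; infer_instance

-- ===== CLAIM (what is proved, stated in full; the proofs are below) =====
def Claim_equal_extract_code_from_partition : Prop := ∀ (details : List (String × List (String × String))) (partition : List (String × Int)), Dom_extract_code_from_partition details partition → Spec_extract_code_from_partition details partition (extract_code_from_partition details partition)

-- ===== LEMMAS AND PROOFS =====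

-- A's per-snippet test, named for the proofs.
def pvTestA (s : String) : Bool :=
  ((PySem.Str.split? (PySem.Str.strip s) "\n").getD []).any (fun line => PySem.Str.isIn "{" line)

-- B's view of a community's node list: the classified (variables, functions) pair.
def pvClassify (e : PySem.Dict String String) (nodes : List String) : List String × List String :=
  let xs := nodes.filterMap (fun n => e.get? n)
  (xs.filter (fun s => !PySem.Str.isIn "{" s), xs.filter (fun s => PySem.Str.isIn "{" s))

-- membership survives dropWhile for an element the predicate rejects
lemma pvMem_dropWhile {p : Char → Bool} {c : Char} (hc : p c = false) (l : List Char) :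
    c ∈ l.dropWhile p ↔ c ∈ l := by
  induction l with
  | nil => simp
  | cons a t ih =>
    by_cases ha : p a = true
    · simp only [List.dropWhile_cons_of_pos ha, ih, List.mem_cons]
      constructor
      · exact Or.inr
      · rintro (rfl | h); · rw [hc] at ha; cases ha
        · exact h
    · simp [List.dropWhile_cons_of_neg ha]

lemma pvMem_strip {c : Char} (hc : PySem.Chars.isspace c = false) (l : List Char) :
    c ∈ PySem.Chars.strip l ↔ c ∈ l := by
  simp only [PySem.Chars.strip, PySem.Chars.rstrip, PySem.Chars.lstrip]
  rw [List.mem_reverse, pvMem_dropWhile hc, List.mem_reverse, pvMem_dropWhile hc]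

-- a character not in the separator lies in some piece of splitOn.go iff it lies in the
-- remaining input, the current chunk or an accumulated piece
lemma pvMem_splitOn_go {c : Char} {sep : List Char} (hc : c ∉ sep) :
    ∀ (fuel : Nat) (l cur : List Char) (acc : List (List Char)),
      (∃ piece ∈ PySem.Chars.splitOn.go sep fuel l cur acc, c ∈ piece) ↔
        (c ∈ l ∨ c ∈ cur ∨ ∃ p ∈ acc, c ∈ p) := by
  intro fuel
  induction fuel with
  | zero =>
    intro l cur acc
    simp [PySem.Chars.splitOn.go]
    aesop
  | succ fuel ih =>
    intro l cur acc
    cases l with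
    | nil =>
      simp [PySem.Chars.splitOn.go]
      aesop
    | cons a rest =>
      rw [PySem.Chars.splitOn.go]
      by_cases hpre : sep.isPrefixOf (a :: rest) = true
      · rw [if_pos hpre]
        rw [ih]
        obtain ⟨t, ht⟩ := (List.isPrefixOf_iff_prefix.mp hpre)
        have hdrop : (a :: rest).drop sep.length = t := by
          rw [← ht, List.drop_left]
        rw [hdrop]
        have hmem : c ∈ (a :: rest) ↔ c ∈ t := by
          rw [← ht, List.mem_append]
          constructor
          · rintro (h | h); · exact absurd h hc
            · exact h
          · exact Or.inr
        simp [hmem]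
      · rw [if_neg hpre]
        rw [ih]
        simp only [List.mem_cons]
        tauto

lemma pvMem_splitOn {c : Char} {sep : List Char} (hc : c ∉ sep) (l : List Char) :
    (∃ piece ∈ PySem.Chars.splitOn l sep, c ∈ piece) ↔ c ∈ l := by
  rw [PySem.Chars.splitOn, pvMem_splitOn_go hc]
  simp

-- A's test (some stripped line contains "{") equals B's test ('{' in snippet)
lemma pvTestA_eq (s : String) : pvTestA s = PySem.Str.isIn "{" s := by
  rw [pvTestA, Bool.eq_iff_iff]
  have hsep : PySem.Str.split? (PySem.Str.strip s) "\n"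
      = Option.map (fun x => List.map String.ofList x)
          (PySem.Chars.split? (PySem.Str.strip s).toList ['\n']) := rfl
  rw [hsep]
  have : PySem.Chars.split? (PySem.Str.strip s).toList ['\n']
      = some (PySem.Chars.splitOn (PySem.Str.strip s).toList ['\n']) := rfl
  rw [this]
  simp only [Option.map_some, Option.getD_some, List.any_map, List.any_eq_true,
    Function.comp, PySem.Str.isIn_eq]
  have hone : ("{" : String).toList = ['{'] := rfl
  rw [hone]
  have hofl : ∀ piece : List Char, (String.ofList piece).toList = piece := by
    intro piece; simp
  constructor
  · rintro ⟨piece, hp, hin⟩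
    rw [hofl] at hin
    rw [PySem.Chars.isIn_iff_infix, List.singleton_infix_iff] at hin ⊢
    have : ∃ piece ∈ PySem.Chars.splitOn (PySem.Str.strip s).toList ['\n'], '{' ∈ piece :=
      ⟨piece, hp, hin⟩
    rw [pvMem_splitOn (by decide)] at this
    rw [PySem.Str.toList_strip, pvMem_strip (by decide)] at this
    exact this
  · intro hin
    rw [PySem.Chars.isIn_iff_infix, List.singleton_infix_iff] at hin
    rw [← pvMem_strip (c := '{') (by decide), ← PySem.Str.toList_strip,
      ← pvMem_splitOn (sep := ['\n']) (by decide)] at hin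
    obtain ⟨piece, hp, hmem⟩ := hin
    refine ⟨piece, hp, ?_⟩
    rw [hofl, PySem.Chars.isIn_iff_infix, List.singleton_infix_iff]
    exact hmem

-- organize_code_snippets computed as the join of B's classified pair
lemma pvOrganize_eq (e : PySem.Dict String String) (nodes : List String) :
    organize_code_snippets (nodes.filterMap (fun n => e.get? n))
      = PySem.Str.join "\n" ((pvClassify e nodes).1 ++ [""] ++ (pvClassify e nodes).2) := by
  unfold organize_code_snippets
  have hstep : (fun (vf : List String × List String) snippet =>
      let lines := (PySem.Str.split? (PySem.Str.strip snippet) "\n").getD []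
      if lines.any (fun line => PySem.Str.isIn "{" line) then (vf.1, vf.2 ++ [snippet])
      else (vf.1 ++ [snippet], vf.2))
      = fun (vf : List String × List String) snippet =>
        ((fun (a : List String) (s : String) => if (!pvTestA s) = true then a ++ [s] else a) vf.1 snippet,
         (fun (a : List String) (s : String) => if pvTestA s = true then a ++ [s] else a) vf.2 snippet) := by
    funext vf s
    show (if pvTestA s = true then (vf.1, vf.2 ++ [s]) else (vf.1 ++ [s], vf.2)) = _
    cases h : pvTestA s <;> simp [h]
  rw [hstep, PySem.List.foldl_prod_mk
      (f := fun (a : List String) (s : String) => if (!pvTestA s) = true then a ++ [s] else a)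
      (g := fun (a : List String) (s : String) => if pvTestA s = true then a ++ [s] else a),
    PySem.List.foldl_append_if_eq_filter, PySem.List.foldl_append_if_eq_filter]
  have hf1 : ∀ (xs : List String), xs.filter (fun s => !pvTestA s)
      = xs.filter (fun s => !PySem.Str.isIn "{" s) :=
    fun xs => List.filter_congr (fun x _ => by rw [pvTestA_eq])
  have hf2 : ∀ (xs : List String), xs.filter (fun s => pvTestA s)
      = xs.filter (fun s => PySem.Str.isIn "{" s) :=
    fun xs => List.filter_congr (fun x _ => by rw [pvTestA_eq])
  simp only [List.nil_append, hf1, hf2, pvClassify]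

-- appending one node to a community's list updates the classified pair
lemma pvClassify_append (e : PySem.Dict String String) (ns : List String) (n : String) :
    pvClassify e (ns ++ [n]) =
      match e.get? n with
      | none => pvClassify e ns
      | some snippet =>
        if PySem.Str.isIn "{" snippet
        then ((pvClassify e ns).1, (pvClassify e ns).2 ++ [snippet])
        else ((pvClassify e ns).1 ++ [snippet], (pvClassify e ns).2) := by
  cases h : e.get? n with
  | none => simp [pvClassify, List.filterMap_append, h]
  | some snippet =>
    by_cases ht : PySem.Str.isIn "{" snippet = true
    · have h1 : ("{" : String).toList = ['{'] := rfl
      simp only [PySem.Str.isIn_eq, h1] at ht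
      simp [pvClassify, List.filterMap_append, List.filter_append, h, ht]
    · have h1 : ("{" : String).toList = ['{'] := rfl
      simp only [PySem.Str.isIn_eq, Bool.not_eq_true, h1] at ht
      simp [pvClassify, List.filterMap_append, List.filter_append, h, ht]

-- the two loop bodies, named for the proofs (definitionally the lambdas of the ports)
def pvStepA (cs : PySem.Dict Int (List String)) (p : String × Int) : PySem.Dict Int (List String) :=
  let cs := if cs.contains p.2 then cs else cs.insert p.2 []
  cs.modify p.2 [] (fun ns => ns ++ [p.1])

def pvStepB (e : PySem.Dict String String) (b : PySem.Dict Int (List String × List String))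
    (p : String × Int) : PySem.Dict Int (List String × List String) :=
  let b := b.setdefault p.2 ([], [])
  match e.get? p.1 with
  | none => b
  | some snippet =>
    b.modify p.2 ([], []) (fun vf =>
      if PySem.Str.isIn "{" snippet then (vf.1, vf.2 ++ [snippet])
      else (vf.1 ++ [snippet], vf.2))

-- no entry of d carries key c when d does not contain c
lemma pvNoKey {ν : Type} (d : PySem.Dict Int ν) (c : Int) (hc : d.contains c = false) :
    ∀ q ∈ d.items, (q.1 == c) = false := by
  intro q hq
  have := hc
  simp only [PySem.Dict.contains, List.any_eq_false] at this
  exact Bool.eq_false_iff.mpr (this q hq)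

-- one step of both loops preserves the simulation invariant
lemma pvStep_inv (e : PySem.Dict String String) (cs : PySem.Dict Int (List String))
    (b : PySem.Dict Int (List String × List String)) (p : String × Int)
    (hnd : cs.keys.Nodup)
    (hinv : b.items = cs.items.map (fun q => (q.1, pvClassify e q.2))) :
    (pvStepA cs p).keys.Nodup ∧
      (pvStepB e b p).items = (pvStepA cs p).items.map (fun q => (q.1, pvClassify e q.2)) := by
  obtain ⟨n, c⟩ := p
  have hbkeys : b.keys = cs.keys := by
    simp [PySem.Dict.keys, hinv, List.map_map, Function.comp]
  have hbcon : ∀ k, b.contains k = cs.contains k := by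
    intro k
    simp only [PySem.Dict.contains, hinv, List.any_map]
    rfl
  by_cases hc : cs.contains c = true
  · -- community already present
    obtain ⟨v, hv⟩ : ∃ v, cs.get? c = some v := by
      have := hc
      rw [PySem.Dict.contains_eq_isSome_get?] at this
      exact Option.isSome_iff_exists.mp this
    have hgetD : cs.getD c [] = v := by rw [PySem.Dict.getD_eq_get?_getD, hv]; rfl
    have hAit : (pvStepA cs (n, c)).items
        = cs.items.map (fun q => if q.1 == c then (c, v ++ [n]) else q) := by
      simp only [pvStepA, hc, if_true, PySem.Dict.modify, hgetD]
      exact PySem.Dict.items_insert_of_contains cs (v ++ [n]) hc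
    have hAkeys : (pvStepA cs (n, c)).keys = cs.keys := by
      simp only [PySem.Dict.keys, hAit, List.map_map]
      apply List.map_congr_left
      intro q _
      by_cases hqc : (q.1 == c) = true
      · simp [Function.comp, (eq_of_beq hqc).symm]
      · simp [Function.comp, hqc]
    -- the unique value at key c
    have hval : ∀ q ∈ cs.items, (q.1 == c) = true → q.2 = v := by
      intro q hq hqc
      have h1 : (c, q.2) ∈ cs.items := by
        have : q = (c, q.2) := by
          obtain ⟨q1, q2⟩ := q
          simp only [Prod.mk.injEq, and_true]
          exact eq_of_beq hqc
        exact this ▸ hq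
      have := PySem.Dict.get?_of_mem_items cs h1 hnd
      rw [hv] at this
      exact (Option.some_inj.mp this).symm
    have hbget : b.getD c ([], []) = pvClassify e v := by
      obtain ⟨pr, hprm, hpr⟩ : ∃ pr ∈ cs.items, (pr.1 == c) = true := by
        have := hc
        simp only [PySem.Dict.contains, List.any_eq_true] at this
        exact this
      have hpr2 : pr.2 = v := hval pr hprm hpr
      have hmem : (c, pvClassify e v) ∈ b.items := by
        rw [hinv]
        refine List.mem_map.mpr ⟨pr, hprm, ?_⟩
        rw [hpr2, eq_of_beq hpr]
      have := PySem.Dict.get?_of_mem_items b hmem (hbkeys ▸ hnd)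
      rw [PySem.Dict.getD_eq_get?_getD, this]
      rfl
    refine ⟨hAkeys ▸ hnd, ?_⟩
    cases h : e.get? n with
    | none =>
      have hB : pvStepB e b (n, c) = b := by
        simp only [pvStepB, PySem.Dict.setdefault_of_contains b ([], []) ((hbcon c).trans hc), h]
      rw [hB, hAit, List.map_map, hinv]
      apply List.map_congr_left
      intro q hq
      by_cases hqc : (q.1 == c) = true
      · simp only [Function.comp, hqc]
        have : pvClassify e (v ++ [n]) = pvClassify e q.2 := by
          rw [hval q hq hqc, pvClassify_append, h]
        simp [this, eq_of_beq hqc]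
      · simp [Function.comp, hqc]
    | some snippet =>
      have hB : pvStepB e b (n, c)
          = b.insert c (if PySem.Str.isIn "{" snippet
              then ((pvClassify e v).1, (pvClassify e v).2 ++ [snippet])
              else ((pvClassify e v).1 ++ [snippet], (pvClassify e v).2)) := by
        simp only [pvStepB, PySem.Dict.setdefault_of_contains b ([], []) ((hbcon c).trans hc), h,
          PySem.Dict.modify, hbget]
      rw [hB, PySem.Dict.items_insert_of_contains b _ ((hbcon c).trans hc), hinv,
        List.map_map, hAit, List.map_map]
      apply List.map_congr_left
      intro q hq
      by_cases hqc : (q.1 == c) = true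
      · simp only [Function.comp, hqc]
        have : pvClassify e (v ++ [n])
            = (if PySem.Str.isIn "{" snippet
                then ((pvClassify e v).1, (pvClassify e v).2 ++ [snippet])
                else ((pvClassify e v).1 ++ [snippet], (pvClassify e v).2)) := by
          rw [pvClassify_append, h]
        simp [this]
      · simp [Function.comp, hqc]
  · -- new community
    have hc' : cs.contains c = false := Bool.not_eq_true _ ▸ hc
    have hbc' : b.contains c = false := (hbcon c).trans hc'
    have hAit : (pvStepA cs (n, c)).items = cs.items ++ [(c, [n])] := by
      simp only [pvStepA, hc', Bool.false_eq_true, if_false, PySem.Dict.modify,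
        PySem.Dict.getD_eq_get?_getD, PySem.Dict.get?_insert_self, Option.getD_some,
        List.nil_append]
      rw [PySem.Dict.items_insert_of_contains _ _ (PySem.Dict.contains_insert_self cs c []),
        PySem.Dict.items_insert_of_not_contains cs [] hc', List.map_append]
      congr 1
      · have hid : ∀ q ∈ cs.items, (if (q.1 == c) = true then (c, [n]) else q) = q := by
          intro q hq; simp [pvNoKey cs c hc' q hq]
        rw [List.map_congr_left hid]
        simp
      · simp
    have hAkeys : (pvStepA cs (n, c)).keys = cs.keys ++ [c] := by
      simp [PySem.Dict.keys, hAit]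
    have hcm : c ∉ cs.keys := fun hm =>
      by rw [(PySem.Dict.contains_iff_mem_keys cs c).mpr hm] at hc'; cases hc'
    have hndA : (pvStepA cs (n, c)).keys.Nodup := by
      rw [hAkeys]
      exact List.Nodup.append hnd (List.nodup_singleton c)
        (fun a ha hb => hcm ((List.mem_singleton.mp hb) ▸ ha))
    refine ⟨hndA, ?_⟩
    have hset : (b.setdefault c ([], [])).items = b.items ++ [(c, ([], []))] := by
      rw [PySem.Dict.setdefault_of_not_contains b ([], []) hbc',
        PySem.Dict.items_insert_of_not_contains b ([], []) hbc']
    cases h : e.get? n with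
    | none =>
      have hB : (pvStepB e b (n, c)).items = b.items ++ [(c, ([], []))] := by
        simp only [pvStepB, h]
        exact hset
      rw [hB, hAit, List.map_append, hinv]
      congr 1
      simp [pvClassify, h]
    | some snippet =>
      have hgd : (b.setdefault c ([], [])).getD c ([], []) = ([], []) := by
        rw [PySem.Dict.getD_eq_get?_getD, PySem.Dict.get?_setdefault_self]
        have : b.get? c = none := by
          have := hbc'
          rw [PySem.Dict.contains_eq_isSome_get?] at this
          exact Option.not_isSome_iff_eq_none.mp (by simp [this])
        simp [this]
      have hconset : (b.setdefault c ([], [])).contains c = true := by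
        rw [PySem.Dict.contains_setdefault]
        simp
      have hB : (pvStepB e b (n, c)).items
          = b.items ++ [(c, if PySem.Str.isIn "{" snippet
              then (([] : List String), [snippet])
              else ([snippet], ([] : List String)))] := by
        simp only [pvStepB, h, PySem.Dict.modify, hgd]
        rw [PySem.Dict.items_insert_of_contains _ _ hconset, hset, List.map_append]
        congr 1
        · have hid : ∀ q ∈ b.items,
              (if (q.1 == c) = true
               then (c, if PySem.Str.isIn "{" snippet = true
                        then (([] : List String), ([] : List String) ++ [snippet])
                        else (([] : List String) ++ [snippet], ([] : List String)))
               else q) = q := by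
            intro q hq; simp [pvNoKey b c hbc' q hq]
          rw [List.map_congr_left hid]
          simp
        · by_cases ht : PySem.Str.isIn "{" snippet = true <;> simp
      rw [hB, hAit, List.map_append, hinv]
      congr 1
      have h1 : ("{" : String).toList = ['{'] := rfl
      by_cases ht : PySem.Str.isIn "{" snippet = true
      · have ht' := ht
        simp only [PySem.Str.isIn_eq, h1] at ht'
        simp [pvClassify, h, ht']
      · have ht' := ht
        simp only [PySem.Str.isIn_eq, h1, Bool.not_eq_true] at ht'
        simp [pvClassify, h, ht']

-- the two whole loops preserve the simulation invariant
lemma pvFold_inv (e : PySem.Dict String String) :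
    ∀ (items : List (String × Int)) (cs : PySem.Dict Int (List String))
      (b : PySem.Dict Int (List String × List String)),
      cs.keys.Nodup →
      b.items = cs.items.map (fun q => (q.1, pvClassify e q.2)) →
      (items.foldl pvStepA cs).keys.Nodup ∧
      (items.foldl (pvStepB e) b).items
        = (items.foldl pvStepA cs).items.map (fun q => (q.1, pvClassify e q.2)) := by
  intro items
  induction items with
  | nil => intro cs b hnd hinv; exact ⟨hnd, hinv⟩
  | cons p rest ih =>
    intro cs b hnd hinv
    obtain ⟨hnd', hinv'⟩ := pvStep_inv e cs b p hnd hinv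
    exact ih (pvStepA cs p) (pvStepB e b p) hnd' hinv'

-- assembling both programs: A's second pass over the grouped dict equals B's final map
lemma pvMain (e : PySem.Dict String String) (items : List (String × Int)) :
    ((items.foldl pvStepA PySem.Dict.empty).items.foldl
        (fun community_codes p => community_codes.insert p.1
          (organize_code_snippets (p.2.filterMap (fun node => e.get? node))))
        PySem.Dict.empty).items
      = (items.foldl (pvStepB e) PySem.Dict.empty).items.map
          (fun p => (p.1, PySem.Str.join "\n" (p.2.1 ++ [""] ++ p.2.2))) := by
  obtain ⟨hnd, hitems⟩ := pvFold_inv e items PySem.Dict.empty PySem.Dict.empty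
    PySem.Dict.nodup_keys_empty rfl
  rw [hitems,
    PySem.Dict.items_foldl_insert_fresh (items.foldl pvStepA PySem.Dict.empty).items
      (fun p => p.1)
      (fun p => organize_code_snippets (p.2.filterMap (fun node => e.get? node)))
      PySem.Dict.empty
      (fun a _ => PySem.Dict.contains_empty a.1)
      hnd]
  simp only [List.map_map]
  apply List.map_congr_left
  intro q _
  simp only [Function.comp]
  rw [pvOrganize_eq]

-- ===== VERDICT (by name: the statement is the Claim_ definition above) =====
theorem extract_code_from_partition_spec : Claim_equal_extract_code_from_partition := by
  intro details partition _
  exact pvMain (PySem.Dict.ofList ((PySem.Dict.ofList details).getD "ent2string" []))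
    (PySem.Dict.ofList partition).items
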